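-- pv_equiv track=rewrite | github.com/valterUo/MultiCategory-backend-py | src/model_transformations/query_language_transformations/SQL/components/recursive_cte.py | process_cte_queries
-- ===== SOURCE A (Python) =====
-- def process_cte_queries(query_list):
--     result = ""
--     start = False
--     for elem in query_list:
--         if start:
--             if elem == ",":
--                 result += elem
--             else:
--                 result += elem + " "
--         if elem == "select" and not start:
--             start = True
--             result += elem + " "
--     return result
-- ===== SOURCE B (Python) =====
-- def process_cte_queries(query_list):
--     parts = []   # renderings of the scanned suffix, in reverse order
--     cut = None   # how many parts lie after the most recent (hence leftmost) 'select'
--     for elem in reversed(query_list):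
--         if elem == "select":
--             cut = len(parts)
--         parts.append(elem if elem == "," else elem + " ")
--     if cut is None:
--         return ""
--     return "select " + "".join(reversed(parts[:cut]))
-- ===== Notes on version B (the rewrite author's own statement) =====
-- stated objective: alternative
-- what changed: Replaces A's left-to-right flag-toggling scan and incremental string concatenation with a single right-to-left pass that collects token renderings into a reversed parts list and records a cut index at the most recent (hence leftmost) 'select', then joins the slice before the cut once at the end.
import Mathlib
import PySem

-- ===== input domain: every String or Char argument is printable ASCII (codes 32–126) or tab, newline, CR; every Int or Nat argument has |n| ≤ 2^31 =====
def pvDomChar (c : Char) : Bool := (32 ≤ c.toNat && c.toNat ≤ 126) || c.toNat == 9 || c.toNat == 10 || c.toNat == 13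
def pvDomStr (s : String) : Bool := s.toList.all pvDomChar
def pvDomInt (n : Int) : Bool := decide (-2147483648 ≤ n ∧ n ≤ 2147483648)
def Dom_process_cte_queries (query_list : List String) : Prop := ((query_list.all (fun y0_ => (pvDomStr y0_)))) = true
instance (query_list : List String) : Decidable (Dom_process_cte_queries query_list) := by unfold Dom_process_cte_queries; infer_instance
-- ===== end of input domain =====

-- B replaces A's left-to-right flag scan with one right-to-left pass that collects reversed renderings and a cut index at the leftmost 'select'; alternative decomposition, same cost.


-- ===== PORT A =====
def pvStepA (st : String × Bool) (elem : String) : String × Bool :=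
  let r := if st.2 then (if elem = "," then st.1 ++ elem else st.1 ++ elem ++ " ") else st.1
  if elem = "select" ∧ st.2 = false then (r ++ elem ++ " ", true) else (r, st.2)

def process_cte_queries (query_list : List String) : String :=
  (query_list.foldl pvStepA ("", false)).1

-- ===== PORT B =====
-- rendering of one token: "elem if elem == ',' else elem + ' '"
def pvRender (elem : String) : String := if elem = "," then elem else elem ++ " "

-- state is (parts, cut); cut is taken before this element's own part is appended, as in Source B
def pvStepB (st : List String × Option Nat) (elem : String) : List String × Option Nat :=
  let cut := if elem = "select" then some st.1.length else st.2
  (st.1 ++ [pvRender elem], cut)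

def pvFinish (st : List String × Option Nat) : String :=
  match st.2 with
  | none => ""
  | some c => "select " ++ PySem.Str.join "" ((st.1.take c).reverse)

def process_cte_queries_alt (query_list : List String) : String :=
  pvFinish (query_list.reverse.foldl pvStepB ([], none))

-- ===== PRECONDITION & SPEC =====
def Spec_process_cte_queries (query_list : List String) (out : String) : Prop := out = process_cte_queries_alt query_list
instance (query_list : List String) (out : String) : Decidable (Spec_process_cte_queries query_list out) := by unfold Spec_process_cte_queries; infer_instance

-- ===== CLAIM (what is proved, stated in full; the proofs are below) =====
def Claim_equal_process_cte_queries : Prop := ∀ (query_list : List String), Dom_process_cte_queries query_list → Spec_process_cte_queries query_list (process_cte_queries query_list)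

-- ===== LEMMAS AND PROOFS =====

-- ''.join unfolded one part at a time
theorem pvJoin_cons (x : String) (xs : List String) :
    PySem.Str.join "" (x :: xs) = x ++ PySem.Str.join "" xs := by
  rw [← String.toList_inj]
  cases xs with
  | nil =>
      rw [PySem.Str.toList_join, String.toList_append, PySem.Str.toList_join]
      simp [PySem.Chars.join_singleton, PySem.Chars.join_nil]
  | cons y ys =>
      rw [PySem.Str.toList_join, String.toList_append, PySem.Str.toList_join]
      simp [PySem.Chars.join_cons_cons]

theorem pvJoin_nil : PySem.Str.join "" ([] : List String) = "" := by
  rw [← String.toList_inj, PySem.Str.toList_join]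
  simp [PySem.Chars.join_nil]

theorem pvJoin_map (l : List String) :
    PySem.Str.join "" (l.map pvRender) = l.foldr (fun e s => pvRender e ++ s) "" := by
  induction l with
  | nil => exact pvJoin_nil
  | cons e t ih => rw [List.map_cons, pvJoin_cons, ih, List.foldr_cons]

-- B's loop over the reversed list is a right fold over the original list
theorem pvB_foldr (l : List String) :
    l.reverse.foldl pvStepB ([], none) = l.foldr (fun e st => pvStepB st e) ([], none) := by
  rw [List.foldl_reverse]

-- the parts accumulator holds the renderings of the suffix, in reverse order
theorem pvB_parts (l : List String) :
    (l.foldr (fun e st => pvStepB st e) ([], none)).1 = (l.map pvRender).reverse := by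
  induction l with
  | nil => rfl
  | cons e t ih =>
      rw [List.foldr_cons]
      generalize List.foldr (fun e st => pvStepB st e) ([], none) t = st at ih
      simp [pvStepB, ih]

-- the cut index never exceeds the number of parts collected so far
theorem pvB_cut_le (l : List String) (c : Nat)
    (h : (l.foldr (fun e st => pvStepB st e) ([], none)).2 = some c) : c ≤ l.length := by
  induction l with
  | nil => simp [List.foldr_nil] at h
  | cons e t ih =>
      rw [List.foldr_cons] at h
      have hp := pvB_parts t
      generalize List.foldr (fun e st => pvStepB st e) ([], none) t = st at h hp ih
      by_cases hs : e = "select"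
      · have : (pvStepB st e).2 = some st.1.length := by simp [pvStepB, hs]
        rw [this] at h
        cases h
        rw [hp]; simp
      · have : (pvStepB st e).2 = st.2 := by simp [pvStepB, hs]
        rw [this] at h
        exact Nat.le_succ_of_le (ih h)

-- once A's flag is set, the rest of A's loop appends the rendering of every remaining element
theorem pvLoop_started (l : List String) (r : String) :
    (l.foldl pvStepA (r, true)).1 = r ++ l.foldr (fun e s => pvRender e ++ s) "" := by
  induction l generalizing r with
  | nil => simp
  | cons e t ih =>
      rw [List.foldl_cons, List.foldr_cons]
      have hA : pvStepA (r, true) e = (r ++ pvRender e, true) := by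
        by_cases h : e = ","
        · simp [pvStepA, pvRender, h]
        · simp [pvStepA, pvRender, h, String.append_assoc]
      rw [hA, ih, String.append_assoc]

theorem pvMain (l : List String) : process_cte_queries l = process_cte_queries_alt l := by
  unfold process_cte_queries process_cte_queries_alt
  rw [pvB_foldr]
  induction l with
  | nil => rfl
  | cons e t ih =>
      rw [List.foldl_cons, List.foldr_cons]
      have hp := pvB_parts t
      have hcle := pvB_cut_le t
      generalize List.foldr (fun e st => pvStepB st e) ([], none) t = st at ih hp hcle
      obtain ⟨parts, cut⟩ := st
      simp only at ih hp hcle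
      by_cases h : e = "select"
      · subst h
        rw [show pvStepA ("", false) "select" = ("select ", true) from rfl, pvLoop_started]
        rw [show pvStepB (parts, cut) "select" = (parts ++ [pvRender "select"], some parts.length) from by
          simp [pvStepB]]
        simp only [pvFinish, List.take_left, hp, List.reverse_reverse, pvJoin_map]
      · rw [show pvStepA ("", false) e = ("", false) from by simp [pvStepA, h]]
        rw [show pvStepB (parts, cut) e = (parts ++ [pvRender e], cut) from by simp [pvStepB, h]]
        cases cut with
        | none => simpa [pvFinish] using ih
        | some c =>
            have hle : c ≤ parts.length := by rw [hp]; simpa using hcle c rfl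
            simpa [pvFinish, List.take_append_of_le_length hle] using ih

-- ===== VERDICT (by name: the statement is the Claim_ definition above) =====
theorem process_cte_queries_spec : Claim_equal_process_cte_queries := by
  intro l _
  unfold Spec_process_cte_queries
  exact pvMain l
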